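-- pv_equiv track=rewrite | github.com/SachaWheeler/games | grid.py | filter_wordlist
-- ===== SOURCE A (Python) =====
-- def filter_wordlist(wordlist, grid, row_index):
--     """
--     Filters the wordlist to keep words that match the current grid columns.
--     """
--     grid_size = len(grid[0]) if grid else len(wordlist[0])
--     filtered_words = []
--
--     for word in wordlist:
--         valid_word = True
--         for col in range(grid_size):
--             if row_index > 0 and len(grid) >= row_index:
--                 for prev_row in range(row_index):
--                     if col < len(grid[prev_row]) and word[col] != grid[prev_row][col]:
--                         valid_word = False
--                         break
--             if not valid_word or word in grid:
--                 break
--         if valid_word: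
--             filtered_words.append(word)
--
--     return filtered_words
-- ===== SOURCE B (Python) =====
-- def filter_wordlist(wordlist, grid, row_index):
--     """
--     Filters the wordlist to keep words that match the current grid columns.
--
--     Precomputes, once per column, the character required by the first
--     row_index grid rows (None if the column is unconstrained, CONFLICT if
--     two rows disagree), then checks each word in a single pass over the
--     columns.
--     """
--     grid_size = len(grid[0]) if grid else len(wordlist[0])
--     if not (0 < row_index <= len(grid)):
--         return list(wordlist)
--
--     CONFLICT = object()
--     required = []
--     for col in range(grid_size):
--         ch = None
--         for row in grid[:row_index]:
--             if col < len(row):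
--                 if ch is None:
--                     ch = row[col]
--                 elif ch != row[col]:
--                     ch = CONFLICT
--                     break
--         required.append(ch)
--
--     def matches(word):
--         for col, ch in enumerate(required):
--             if ch is None:
--                 continue
--             if ch is CONFLICT or col >= len(word) or word[col] != ch:
--                 return False
--         return True
--
--     return [w for w in wordlist if matches(w)]
-- ===== Notes on version B (the rewrite author's own statement) =====
-- stated objective: faster
-- what changed: Instead of re-scanning all previous grid rows for every column of every word, B precomputes once per column the character required by the first row_index rows (free/required/conflict) and checks each word in one O(columns) pass; Pre_ excludes only the inputs on which A raises IndexError (both lists empty, or a word shorter than an applicable grid row that matches on its whole length).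
-- intended difference: When a word of the wordlist also occurs as a grid row and the previous-row check is active, A's 'word in grid' break stops checking after column 0, so A keeps a word that matches column 0 but contradicts a previous row in a later column; B checks every column and rejects it, which is the intended filtering. — e.g. on filter_wordlist(["ax"], ["ab", "ax"], 1): A returns ["ax"], B returns []
import Mathlib
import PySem

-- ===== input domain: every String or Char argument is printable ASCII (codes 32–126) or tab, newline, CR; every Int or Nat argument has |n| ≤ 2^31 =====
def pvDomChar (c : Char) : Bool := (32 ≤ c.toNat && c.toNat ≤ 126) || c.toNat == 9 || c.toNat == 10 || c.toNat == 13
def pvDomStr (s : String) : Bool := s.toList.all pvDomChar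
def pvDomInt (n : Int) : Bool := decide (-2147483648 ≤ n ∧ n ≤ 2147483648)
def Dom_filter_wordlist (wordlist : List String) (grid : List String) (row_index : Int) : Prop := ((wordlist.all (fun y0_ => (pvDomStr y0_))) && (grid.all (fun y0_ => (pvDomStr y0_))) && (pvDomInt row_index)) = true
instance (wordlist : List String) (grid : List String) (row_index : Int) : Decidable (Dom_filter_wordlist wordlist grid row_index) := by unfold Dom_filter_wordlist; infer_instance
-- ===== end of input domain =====

-- B precomputes per-column requirements once and checks each word in one pass over the
-- columns (objective: faster); on words that also occur as grid rows A stops checking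
-- after column 0, so A and B intentionally differ there (see D_ below).

-- ===== PORT A =====
-- inner 'for prev_row in range(row_index)' loop, with break on mismatch.
-- 'word[col] != grid[prev_row][col]' is ported as an Option Char comparison via
-- PySem.Str.pyGet?: word[col] out of range (IndexError, excluded by Pre_) gives none,
-- which compares unequal to the in-range grid character; exact inside Pre_.
def aPrevLoop (word : String) (grid : List String) (col : Int) : List Int → Bool
  | [] => true
  | r :: rs =>
    let row := (PySem.List.pyGet? grid r).getD ""
    if col < (PySem.Str.len row : Int) ∧ PySem.Str.pyGet? word col ≠ PySem.Str.pyGet? row col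
    then false
    else aPrevLoop word grid col rs

-- outer 'for col in range(grid_size)' loop with its two breaks
def aColLoop (word : String) (grid : List String) (row_index : Int) : List Int → Bool
  | [] => true
  | c :: cs =>
    let valid : Bool :=
      if row_index > 0 ∧ (grid.length : Int) ≥ row_index then
        aPrevLoop word grid c (PySem.List.pyRange 0 row_index 1)
      else true
    if !valid then false
    else if word ∈ grid then valid
    else aColLoop word grid row_index cs

def filter_wordlist (wordlist : List String) (grid : List String) (row_index : Int) : List String :=
  -- grid[0] / wordlist[0] raise IndexError when both lists are empty (excluded by Pre_)
  let grid_size : Int :=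
    if grid ≠ [] then (PySem.Str.len ((PySem.List.pyGet? grid 0).getD "") : Int)
    else (PySem.Str.len ((PySem.List.pyGet? wordlist 0).getD "") : Int)
  wordlist.foldl
    (fun acc word =>
      if aColLoop word grid row_index (PySem.List.pyRange 0 grid_size 1)
      then acc ++ [word] else acc) []

-- ===== PORT B =====
-- per-column requirement: none = no constraint (Python None), some none = CONFLICT,
-- some (some x) = required character x
def bColReq (rows : List String) (c : Int) (ch : Option (Option Char)) : Option (Option Char) :=
  match rows with
  | [] => ch
  | row :: rs =>
    if c < (PySem.Str.len row : Int) then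
      match ch with
      | none => bColReq rs c (some (PySem.Str.pyGet? row c))
      | some r =>
        if PySem.Str.pyGet? row c ≠ r then some none   -- CONFLICT, break
        else bColReq rs c ch
    else bColReq rs c ch

-- 'def matches(word)' of Source B: 'for col, ch in enumerate(required)' with counter col
def bMatches (word : String) (col : Int) : List (Option (Option Char)) → Bool
  | [] => true
  | ch :: rest =>
    match ch with
    | none => bMatches word (col + 1) rest
    | some none => false
    | some (some x) =>
      if col ≥ (PySem.Str.len word : Int) ∨ PySem.Str.pyGet? word col ≠ some x then false
      else bMatches word (col + 1) rest

def filter_wordlist_alt (wordlist : List String) (grid : List String) (row_index : Int) : List String :=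
  let grid_size : Int :=
    if grid ≠ [] then (PySem.Str.len ((PySem.List.pyGet? grid 0).getD "") : Int)
    else (PySem.Str.len ((PySem.List.pyGet? wordlist 0).getD "") : Int)
  if ¬ (0 < row_index ∧ row_index ≤ (grid.length : Int)) then wordlist
  else
    let rows := PySem.List.slice grid none (some row_index)          -- grid[:row_index]
    let required := (PySem.List.pyRange 0 grid_size 1).map (fun c => bColReq rows c none)
    wordlist.filter (fun w => bMatches w 0 required)

-- ===== PRECONDITION & SPEC =====
-- grid_size, as A computes it (0 stands in for the IndexError case excluded by Pre_'s first conjunct)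
def pvGridSize (wordlist : List String) (grid : List String) : Nat :=
  if grid ≠ [] then (grid.headD "").length else (wordlist.headD "").length

-- word w makes Python A hit word[col] with col ≥ len(w): some applicable previous row
-- extends past w (within grid_size), w matches every applicable column on its whole
-- length, and (because A stops after column 0 for a word that is a grid row) w, if it
-- is a grid row, must be empty
def pvRaiseW (w : String) (grid : List String) (row_index : Int) (gs : Nat) : Prop :=
  (∃ row ∈ grid.take row_index.toNat, w.length < row.length ∧ w.length < gs) ∧
  (∀ c < w.length, c < gs → ∀ row ∈ grid.take row_index.toNat, c < row.length →
      w.toList[c]? = row.toList[c]?) ∧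
  (w ∈ grid → w.length = 0)

-- Pre_ excludes exactly the inputs on which Python A raises IndexError: both lists empty
-- (grid[0]/wordlist[0]), or — when the previous-row check is active — some word runs out
-- of characters as described by pvRaiseW
def Pre_filter_wordlist (wordlist : List String) (grid : List String) (row_index : Int) : Prop :=
  (grid ≠ [] ∨ wordlist ≠ []) ∧
  ((0 < row_index ∧ row_index ≤ (grid.length : Int)) →
    ∀ w ∈ wordlist, ¬ pvRaiseW w grid row_index (pvGridSize wordlist grid))

instance (wordlist : List String) (grid : List String) (row_index : Int) :
    Decidable (Pre_filter_wordlist wordlist grid row_index) := by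
  unfold Pre_filter_wordlist pvRaiseW; infer_instance

def pvWitness_filter_wordlist : List String × List String × Int := (["ab", "cd"], ["ax"], 1)

-- column c of word w is consistent with every applicable previous row
def pvColMatch (w : String) (rows : List String) (c : Nat) : Prop :=
  ∀ row ∈ rows, c < row.length → w.toList[c]? = row.toList[c]?

-- When a word of the wordlist is also a grid row and the previous-row check is active,
-- A's 'word in grid' break stops checking after column 0, so A keeps a word matching
-- column 0 but contradicting a previous row in a later column; B checks every column
-- and rejects it, which is the intended filtering.
def D_filter_wordlist (wordlist : List String) (grid : List String) (row_index : Int) : Prop :=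
  (0 < row_index ∧ row_index ≤ (grid.length : Int)) ∧
  0 < pvGridSize wordlist grid ∧
  ∃ w ∈ wordlist, w ∈ grid ∧ pvColMatch w (grid.take row_index.toNat) 0 ∧
    ∃ c < pvGridSize wordlist grid, 1 ≤ c ∧ ¬ pvColMatch w (grid.take row_index.toNat) c

instance (wordlist : List String) (grid : List String) (row_index : Int) :
    Decidable (D_filter_wordlist wordlist grid row_index) := by
  unfold D_filter_wordlist pvColMatch; infer_instance

def Spec_filter_wordlist (wordlist : List String) (grid : List String) (row_index : Int) (out : List String) : Prop := ¬ D_filter_wordlist wordlist grid row_index → out = filter_wordlist_alt wordlist grid row_index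
instance (wordlist : List String) (grid : List String) (row_index : Int) (out : List String) : Decidable (Spec_filter_wordlist wordlist grid row_index out) := by unfold Spec_filter_wordlist; infer_instance

def pvDiffWitness_filter_wordlist : List String × List String × Int := (["ax"], ["ab", "ax"], 1)
def pvDiffWitnessOut_filter_wordlist : (List String) × (List String) := (["ax"], [])

-- ===== CLAIM (what is proved, stated in full; the proofs are below) =====
def Claim_unchanged_filter_wordlist : Prop := ∀ (wordlist : List String) (grid : List String) (row_index : Int), Dom_filter_wordlist wordlist grid row_index → Pre_filter_wordlist wordlist grid row_index → Spec_filter_wordlist wordlist grid row_index (filter_wordlist wordlist grid row_index)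
def Claim_changed_filter_wordlist : Prop := Dom_filter_wordlist (pvDiffWitness_filter_wordlist.1) (pvDiffWitness_filter_wordlist.2.1) (pvDiffWitness_filter_wordlist.2.2) ∧ Pre_filter_wordlist (pvDiffWitness_filter_wordlist.1) (pvDiffWitness_filter_wordlist.2.1) (pvDiffWitness_filter_wordlist.2.2) ∧ D_filter_wordlist (pvDiffWitness_filter_wordlist.1) (pvDiffWitness_filter_wordlist.2.1) (pvDiffWitness_filter_wordlist.2.2) ∧ filter_wordlist (pvDiffWitness_filter_wordlist.1) (pvDiffWitness_filter_wordlist.2.1) (pvDiffWitness_filter_wordlist.2.2) = pvDiffWitnessOut_filter_wordlist.1 ∧ filter_wordlist_alt (pvDiffWitness_filter_wordlist.1) (pvDiffWitness_filter_wordlist.2.1) (pvDiffWitness_filter_wordlist.2.2) = pvDiffWitnessOut_filter_wordlist.2 ∧ pvDiffWitnessOut_filter_wordlist.1 ≠ pvDiffWitnessOut_filter_wordlist.2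
def Claim_exact_filter_wordlist : Prop := ∀ (wordlist : List String) (grid : List String) (row_index : Int), Dom_filter_wordlist wordlist grid row_index → Pre_filter_wordlist wordlist grid row_index → D_filter_wordlist wordlist grid row_index → filter_wordlist wordlist grid row_index ≠ filter_wordlist_alt wordlist grid row_index

-- ===== LEMMAS AND PROOFS =====

-- per-row column check both algorithms agree on
def colOK1 (w row : String) (c : Int) : Bool :=
  !(decide (c < (row.length : Int))) ||
    decide (PySem.List.pyGet? w.toList c = PySem.List.pyGet? row.toList c)

-- the b-side requirement state, seen through bMatches's match
def reqStep (w : String) (c : Int) : Option (Option Char) → Bool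
  | none => true
  | some none => false
  | some (some x) => decide (PySem.List.pyGet? w.toList c = some x)

-- b-side verdict for one column
def termB (rows : List String) (w : String) (c : Int) : Bool :=
  reqStep w c (bColReq rows c none)

theorem all_congr_mem {l : List Int} {f g : Int → Bool}
    (h : ∀ c ∈ l, f c = g c) : l.all f = l.all g := by
  induction l with
  | nil => rfl
  | cons c cs ih =>
    rw [List.all_cons, List.all_cons, h c (by simp), ih (fun x hx => h x (by simp [hx]))]

theorem foldl_app (l : List String) (p : String → Bool) (acc : List String) :
    l.foldl (fun acc x => if p x then acc ++ [x] else acc) acc = acc ++ l.filter p := by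
  induction l generalizing acc with
  | nil => simp
  | cons x xs ih => by_cases h : p x <;> simp [List.filter, h, ih]

theorem aPrevLoop_all (w : String) (grid : List String) (c : Int) (l : List Int) :
    aPrevLoop w grid c l = l.all (fun r => colOK1 w ((PySem.List.pyGet? grid r).getD "") c) := by
  induction l with
  | nil => rfl
  | cons r rs ih =>
    rw [aPrevLoop, List.all_cons, ← ih]
    generalize aPrevLoop w grid c rs = X
    by_cases h1 : c < (((PySem.List.pyGet? grid r).getD "").length : Int)
    · by_cases h2 : PySem.List.pyGet? w.toList c = PySem.List.pyGet? ((PySem.List.pyGet? grid r).getD "").toList c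
      · simp [colOK1, h1, h2]
      · simp [colOK1, h1, h2]
    · simp [colOK1, h1]

theorem bColReq_spec (w : String) (c : Int) (hc : 0 ≤ c) (rows : List String)
    (ch : Option (Option Char)) :
    reqStep w c (bColReq rows c ch) = ((rows.all (fun row => colOK1 w row c)) && reqStep w c ch) := by
  induction rows generalizing ch with
  | nil => rw [bColReq]; simp
  | cons row rs ih =>
    by_cases hlt : c < (row.length : Int)
    · have hlt' : c < (PySem.Str.len row : Int) := by simpa using hlt
      have h1 : c.toNat < row.toList.length := by
        simp only [String.length_toList]; omega
      have hy : ∃ y, PySem.Str.pyGet? row c = some y := by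
        simp [PySem.List.pyGet?_of_nonneg _ hc, List.getElem?_eq_getElem h1]
      obtain ⟨y, hy⟩ := hy
      have hyl : PySem.List.pyGet? row.toList c = some y := by simpa using hy
      cases ch with
      | none =>
        rw [bColReq]
        rw [if_pos hlt', hy, ih]
        simp [colOK1, hlt, hyl, reqStep, Bool.and_comm]
      | some r =>
        by_cases heq : PySem.Str.pyGet? row c = r
        · rw [bColReq]
          rw [if_pos hlt', if_neg (by simpa using heq), ih]
          subst heq
          rw [hy] at *
          simp only [colOK1, reqStep, hyl, List.all_cons]
          simp only [hlt, decide_true, Bool.not_true, Bool.false_or]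
          cases decide (PySem.List.pyGet? w.toList c = some y)
          · simp
          · simp
        · rw [bColReq]
          rw [if_pos hlt', if_pos (by simpa using heq)]
          cases r with
          | none => simp [reqStep]
          | some x =>
            have hxy : ¬ (y = x) := by
              intro h; exact heq (by rw [hy, h])
            simp only [reqStep, colOK1, List.all_cons, hlt, decide_true, Bool.not_true,
              Bool.false_or, hyl]
            by_cases hw : PySem.List.pyGet? w.toList c = some y
            · have hnx : ¬ (PySem.List.pyGet? w.toList c = some x) := by
                rw [hw]; simp [hxy]
              simp [hnx]
            · simp [hw]
    · rw [bColReq.eq_def]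
      simp only [if_neg (show ¬ c < (PySem.Str.len row : Int) by simpa using hlt), ih]
      simp [colOK1, hlt]

theorem all_range_getD (grid : List String) (f : String → Bool) :
    ∀ n, n ≤ grid.length →
      (List.range n).all (fun k => f ((grid[k]?).getD "")) = (grid.take n).all f := by
  intro n
  induction n with
  | zero => simp
  | succ n ih =>
    intro h
    have hn : n < grid.length := by omega
    rw [List.range_succ, List.all_append, ih (by omega), List.take_add_one,
      List.getElem?_eq_getElem hn]
    simp only [Option.toList_some, List.all_append, List.all_cons, List.all_nil,
      Bool.and_true]
    rw [List.getElem?_eq_getElem hn]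
    simp

theorem all_pyRange_getD (grid : List String) (f : String → Bool) (ri : Int)
    (h0 : 0 ≤ ri) (hle : ri ≤ (grid.length : Int)) :
    (PySem.List.pyRange 0 ri 1).all (fun r => f ((PySem.List.pyGet? grid r).getD ""))
      = (grid.take ri.toNat).all f := by
  obtain ⟨n, rfl⟩ := Int.eq_ofNat_of_zero_le h0
  have hn : n ≤ grid.length := by exact_mod_cast hle
  rw [PySem.List.pyRange_one, List.all_map]
  simp only [Int.sub_zero, Int.toNat_natCast]
  rw [← all_range_getD grid f n hn]
  congr 1
  funext k
  simp

-- A's per-column verdict equals B's, for columns 0 ≤ c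
theorem colA_eq_termB (w : String) (grid : List String) (ri c : Int)
    (hr : 0 < ri ∧ ri ≤ (grid.length : Int)) (hc : 0 ≤ c) :
    aPrevLoop w grid c (PySem.List.pyRange 0 ri 1)
      = termB (PySem.List.slice grid none (some ri)) w c := by
  rw [aPrevLoop_all, termB, bColReq_spec w c hc]
  rw [show PySem.List.slice grid none (some ri) = grid.take ri.toNat from
    PySem.List.slice_to grid hr.1.le]
  rw [all_pyRange_getD grid (fun row => colOK1 w row c) ri hr.1.le hr.2]
  simp [reqStep]

theorem aColLoop_true (w : String) (grid : List String) (ri : Int)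
    (h : ¬ (ri > 0 ∧ (grid.length : Int) ≥ ri)) :
    ∀ cs, aColLoop w grid ri cs = true := by
  intro cs
  induction cs with
  | nil => rfl
  | cons c cs ih =>
    rw [aColLoop, if_neg h]
    by_cases hm : w ∈ grid <;> simp [hm, ih]

theorem aColLoop_nomem (w : String) (grid : List String) (ri : Int)
    (h : ri > 0 ∧ (grid.length : Int) ≥ ri) (hm : w ∉ grid) :
    ∀ cs, aColLoop w grid ri cs
      = cs.all (fun c => aPrevLoop w grid c (PySem.List.pyRange 0 ri 1)) := by
  intro cs
  induction cs with
  | nil => rfl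
  | cons c cs ih =>
    rw [aColLoop, if_pos h]
    cases hv : aPrevLoop w grid c (PySem.List.pyRange 0 ri 1) <;> simp [hv, hm, ih]

theorem aColLoop_mem (w : String) (grid : List String) (ri : Int)
    (h : ri > 0 ∧ (grid.length : Int) ≥ ri) (hm : w ∈ grid) (c : Int) (cs : List Int) :
    aColLoop w grid ri (c :: cs) = aPrevLoop w grid c (PySem.List.pyRange 0 ri 1) := by
  rw [aColLoop, if_pos h]
  cases hv : aPrevLoop w grid c (PySem.List.pyRange 0 ri 1) <;> simp [hm]

-- bMatches over the mapped requirement table is the conjunction of per-column verdicts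
theorem bMatches_all (rows : List String) (w : String) :
    ∀ n : Nat, ∀ a b : Int, 0 ≤ a → (b - a).toNat = n →
      bMatches w a ((PySem.List.pyRange a b 1).map (fun c => bColReq rows c none))
        = (PySem.List.pyRange a b 1).all (fun c => termB rows w c) := by
  intro n
  induction n with
  | zero =>
    intro a b ha hn
    rw [PySem.List.pyRange_one_eq_nil (by omega)]
    rfl
  | succ n ih =>
    intro a b ha hn
    have hab : a < b := by omega
    rw [PySem.List.pyRange_one_cons hab, List.map_cons, List.all_cons, bMatches.eq_def]
    have ih' := ih (a + 1) b (by omega) (by omega)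
    cases hb : bColReq rows a none with
    | none => simp [termB, reqStep, hb, ih']
    | some r =>
      cases r with
      | none => simp [termB, reqStep, hb]
      | some x =>
        by_cases hw : PySem.List.pyGet? w.toList a = some x
        · have h2 : a.toNat < w.toList.length := by
            rw [PySem.List.pyGet?_of_nonneg _ ha] at hw
            exact (List.getElem?_eq_some_iff.mp hw).1
          have hlen : a < (w.length : Int) := by
            simp only [String.length_toList] at h2; omega
          dsimp only
          rw [if_neg (by simp [hw]; omega)]
          simp [termB, reqStep, hb, hw, ih']
        · dsimp only
          rw [if_pos (by simp [hw])]
          simp [termB, reqStep, hb, hw]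

-- bridge from the b-side per-column verdict to the D_/Pre_-side pvColMatch proposition
theorem termB_iff (grid : List String) (ri : Int) (w : String) (n : Nat)
    (hri : 0 ≤ ri) :
    termB (PySem.List.slice grid none (some ri)) w (n : Int) = true
      ↔ pvColMatch w (grid.take ri.toNat) n := by
  rw [show PySem.List.slice grid none (some ri) = grid.take ri.toNat from
    PySem.List.slice_to grid hri]
  rw [termB, bColReq_spec w (n : Int) (by omega)]
  simp only [reqStep, Bool.and_true, List.all_eq_true, pvColMatch]
  refine forall_congr' fun row => forall_congr' fun _ => ?_
  simp [colOK1, PySem.List.pyGet?_of_nonneg _ (by omega : (0:Int) ≤ (n:Int)),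
    Decidable.imp_iff_not_or]

-- both ports compute the same grid_size; it equals pvGridSize
theorem gs_eq (wordlist grid : List String) :
    (if grid ≠ [] then (PySem.Str.len ((PySem.List.pyGet? grid 0).getD "") : Int)
     else (PySem.Str.len ((PySem.List.pyGet? wordlist 0).getD "") : Int))
      = (pvGridSize wordlist grid : Int) := by
  unfold pvGridSize
  have h : ∀ xs : List String, ((PySem.List.pyGet? xs 0).getD "") = xs.headD "" := by
    intro xs
    cases xs with
    | nil => simp [PySem.List.pyGet?]
    | cons a l => rw [PySem.List.pyGet?_zero_cons]; rfl
  by_cases hg : grid = [] <;> simp [hg, h]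

-- per-word agreement when the previous-row check is active and the word is not a grid
-- row, or the word is a grid row but D_'s per-word condition fails for it
theorem perWord (w : String) (grid : List String) (ri gs : Int) (hgs0 : 0 ≤ gs)
    (hr : 0 < ri ∧ ri ≤ (grid.length : Int))
    (hD : w ∈ grid →
      ¬ (pvColMatch w (grid.take ri.toNat) 0 ∧
         ∃ c : Nat, (c : Int) < gs ∧ 1 ≤ c ∧ ¬ pvColMatch w (grid.take ri.toNat) c)) :
    aColLoop w grid ri (PySem.List.pyRange 0 gs 1)
      = bMatches w 0 ((PySem.List.pyRange 0 gs 1).map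
          (fun c => bColReq (PySem.List.slice grid none (some ri)) c none)) := by
  rw [bMatches_all _ w (gs - 0).toNat 0 gs le_rfl rfl]
  by_cases hm : w ∈ grid
  · by_cases hpos : 0 < gs
    · rw [PySem.List.pyRange_one_cons hpos, aColLoop_mem w grid ri hr hm, List.all_cons,
        colA_eq_termB w grid ri 0 hr le_rfl]
      cases h0 : termB (PySem.List.slice grid none (some ri)) w 0 with
      | false => simp
      | true =>
        have hpass0 : pvColMatch w (grid.take ri.toNat) 0 := by
          have := (termB_iff grid ri w 0 hr.1.le).mp (by exact_mod_cast h0)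
          exact this
        have hall : ∀ c ∈ PySem.List.pyRange 1 gs 1,
            termB (PySem.List.slice grid none (some ri)) w c = true := by
          intro c hc
          rw [PySem.List.mem_pyRange_one] at hc
          have hc0 : c = (c.toNat : Int) := by omega
          rw [hc0, termB_iff grid ri w c.toNat hr.1.le]
          by_contra hfail
          exact hD hm ⟨hpass0, c.toNat, by omega, by omega, hfail⟩
        simp [List.all_eq_true.mpr hall]
    · rw [PySem.List.pyRange_one_eq_nil (by omega)]; rfl
  · rw [aColLoop_nomem w grid ri hr hm]
    refine all_congr_mem ?_
    intro c hc
    rw [PySem.List.mem_pyRange_one] at hc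
    exact colA_eq_termB w grid ri c hr hc.1

-- ===== VERDICT (by name: the statements are the Claim_ definitions above) =====
theorem filter_wordlist_spec : Claim_unchanged_filter_wordlist := by
  intro wordlist grid ri _ _ hnD
  unfold filter_wordlist filter_wordlist_alt
  simp only []
  rw [foldl_app]
  by_cases hr : 0 < ri ∧ ri ≤ (grid.length : Int)
  · rw [if_neg (not_not_intro hr), List.nil_append]
    apply List.filter_congr
    intro w hw
    set gsI : Int :=
      (if grid ≠ [] then (PySem.Str.len ((PySem.List.pyGet? grid 0).getD "") : Int)
       else (PySem.Str.len ((PySem.List.pyGet? wordlist 0).getD "") : Int)) with hgsI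
    have hgs0 : 0 ≤ gsI := by rw [hgsI, gs_eq]; positivity
    refine perWord w grid ri gsI hgs0 hr ?_
    intro hm ⟨hpass0, c, hclt, hc1, hfail⟩
    refine hnD ⟨hr, ?_, w, hw, hm, hpass0, c, ?_, hc1, hfail⟩
    · have := hclt
      rw [hgsI, gs_eq] at this
      omega
    · have := hclt
      rw [hgsI, gs_eq] at this
      exact_mod_cast this
  · rw [if_pos hr, List.nil_append]
    rw [List.filter_eq_self.mpr]
    intro w _
    exact aColLoop_true w grid ri hr _

theorem filter_wordlist_changed : Claim_changed_filter_wordlist := by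
  unfold Claim_changed_filter_wordlist; decide

theorem filter_wordlist_tight : Claim_exact_filter_wordlist := by
  intro wordlist grid ri _ _ hD heq
  obtain ⟨hr, hgs, w, hwl, hm, hpass0, c, hclt, hc1, hfail⟩ := hD
  unfold filter_wordlist filter_wordlist_alt at heq
  rw [foldl_app, List.nil_append, if_neg (not_not_intro hr)] at heq
  set gsI : Int :=
    (if grid ≠ [] then (PySem.Str.len ((PySem.List.pyGet? grid 0).getD "") : Int)
     else (PySem.Str.len ((PySem.List.pyGet? wordlist 0).getD "") : Int)) with hgsI
  have hgsv : gsI = (pvGridSize wordlist grid : Int) := by rw [hgsI, gs_eq]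
  have hpos : 0 < gsI := by rw [hgsv]; exact_mod_cast hgs
  -- A accepts w: the 'word in grid' break stops after column 0, which matches
  have hA : aColLoop w grid ri (PySem.List.pyRange 0 gsI 1) = true := by
    rw [PySem.List.pyRange_one_cons hpos, aColLoop_mem w grid ri hr hm,
      colA_eq_termB w grid ri 0 hr le_rfl]
    exact (termB_iff grid ri w 0 hr.1.le).mpr hpass0
  -- B rejects w: column c fails
  have hB : bMatches w 0 ((PySem.List.pyRange 0 gsI 1).map
      (fun x => bColReq (PySem.List.slice grid none (some ri)) x none)) = false := by
    rw [bMatches_all _ w (gsI - 0).toNat 0 gsI le_rfl rfl]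
    refine List.all_eq_false.mpr ⟨(c : Int), ?_, ?_⟩
    · rw [PySem.List.mem_pyRange_one]
      constructor
      · omega
      · rw [hgsv]; exact_mod_cast hclt
    · rw [Bool.not_eq_true]
      rw [← Bool.not_eq_true (termB _ w (c:Int))] at *
      intro hT
      exact hfail ((termB_iff grid ri w c hr.1.le).mp hT)
  have hmemA : w ∈ wordlist.filter
      (fun word => aColLoop word grid ri (PySem.List.pyRange 0 gsI 1)) :=
    List.mem_filter.mpr ⟨hwl, hA⟩
  rw [heq] at hmemA
  have := (List.mem_filter.mp hmemA).2
  rw [hB] at this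
  exact absurd this (by simp)
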